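-- pv_equiv track=rewrite | github.com/jins408/Algorithm | programmers/Level2/2n^ 배열 자르기(시간초과).py | solution
-- ===== SOURCE A (Python) =====
-- def solution(n, left, right):
--
--     arr = [[0]*n for _ in range(n)]
--
--     for i in range(n):
--         for j in range(i,i+1):
--             arr[i][j] = i+1
--
--         # 위, 왼쪽
--         dr = [-1, 0]
--         dc = [0, -1]
--         r = i
--         c = j
--         index = i+1
--         for i in range(2):
--             nr = r
--             nc = c
--             while True:
--                 nr += dr[i]
--                 nc += dc[i]
--                 if 0 <= nr <= n and 0 <= nc <= n and arr[nr][nc]==0: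
--                     arr[nr][nc] = index
--                 else:
--                     break
--
--     list = [data for i in arr for data in i]
--
--     return  list[left:right+1]
-- ===== SOURCE B (Python) =====
-- def solution(n, left, right):
--     # Value at flat index i of the n x n matrix is max(row, col) + 1.
--     # Normalize the slice bounds [left : right+1] by Python's slice rules,
--     # then compute each requested entry directly -- no matrix is built.
--     size = n * n if n > 0 else 0
--     a = left + size if left < 0 else left
--     a = min(max(a, 0), size)
--     b = right + 1
--     b = b + size if b < 0 else b
--     b = min(max(b, 0), size)
--     return [max(i // n, i % n) + 1 for i in range(a, b)]
-- ===== Notes on version B (the rewrite author's own statement) =====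
-- stated objective: faster
-- what changed: instead of allocating an n x n matrix and filling it diagonal-by-diagonal with two inner while loops before flattening and slicing, B normalizes the slice bounds arithmetically and computes each requested entry in closed form as max(i//n, i%n)+1
import Mathlib
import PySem

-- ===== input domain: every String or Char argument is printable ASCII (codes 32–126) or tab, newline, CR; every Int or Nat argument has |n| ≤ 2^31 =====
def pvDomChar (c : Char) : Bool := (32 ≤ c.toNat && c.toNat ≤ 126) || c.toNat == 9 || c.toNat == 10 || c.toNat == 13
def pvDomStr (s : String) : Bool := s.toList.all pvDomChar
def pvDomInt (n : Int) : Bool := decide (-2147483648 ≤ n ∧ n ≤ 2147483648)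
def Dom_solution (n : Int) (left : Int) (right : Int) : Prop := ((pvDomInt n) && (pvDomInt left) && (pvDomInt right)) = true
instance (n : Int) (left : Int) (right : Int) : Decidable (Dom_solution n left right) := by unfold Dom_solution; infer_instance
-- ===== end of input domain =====

-- B replaces A's n×n matrix fill (diagonal + two inner while loops per row, then
-- flatten and slice) by normalizing the slice bounds arithmetically and computing
-- each requested entry in closed form as max(i//n, i%n) + 1.

-- ===== PORT A =====
-- arr[r][c] read; whenever the Python evaluates it the indices are in range
-- (the bounds conjuncts to its left are checked first and the walk only moves
-- up/left from (i,i)), so the defaults are never the value Python sees.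
def pvGetCell (arr : List (List Int)) (r c : Int) : Int :=
  PySem.List.pyGetD (PySem.List.pyGetD arr r []) c 1

-- arr[r][c] = v; only executed with in-range nonnegative r, c, where pySetD is exact.
def pvSetCell (arr : List (List Int)) (r c : Int) (v : Int) : List (List Int) :=
  PySem.List.pySetD arr r (PySem.List.pySetD (PySem.List.pyGetD arr r []) c v)

-- the 'while True' walk in direction (dr, dc); the fuel only makes it total (the
-- Python loop stops after at most r+1 resp. c+1 steps and callers pass enough fuel).
def pvWhile (n dr dc index : Int) : Nat → List (List Int) → Int → Int → List (List Int)
  | 0, arr, _, _ => arr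
  | fuel+1, arr, r, c =>
    let nr := r + dr
    let nc := c + dc
    if 0 ≤ nr ∧ nr ≤ n ∧ 0 ≤ nc ∧ nc ≤ n ∧ pvGetCell arr nr nc = 0 then
      pvWhile n dr dc index fuel (pvSetCell arr nr nc index) nr nc
    else arr

-- one iteration of 'for i in range(n)':
-- 'for j in range(i, i+1)' is the single assignment arr[i][i] = i+1, then
-- 'for i in range(2)' over dr=[-1,0], dc=[0,-1] gives the two walks, unrolled.
def pvOuter (n : Int) (arr : List (List Int)) (i : Int) : List (List Int) :=
  let arr1 := pvSetCell arr i i (i+1)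
  let arr2 := pvWhile n (-1) 0 (i+1) (n.toNat+1) arr1 i i
  pvWhile n 0 (-1) (i+1) (n.toNat+1) arr2 i i

def solution (n : Int) (left : Int) (right : Int) : List Int :=
  -- arr = [[0]*n for _ in range(n)]
  let arr0 := (PySem.List.pyRange 0 n 1).map (fun _ => List.replicate n.toNat (0:Int))
  let arr := (PySem.List.pyRange 0 n 1).foldl (pvOuter n) arr0
  -- list = [data for i in arr for data in i]
  let flat := arr.flatMap (fun row => row)
  PySem.List.slice flat (some left) (some (right+1))

-- ===== PORT B =====
def solution_alt (n : Int) (left : Int) (right : Int) : List Int :=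
  let size := if 0 < n then n*n else 0
  let a0 := if left < 0 then left + size else left
  let a := min (max a0 0) size
  let b0 := right + 1
  let b1 := if b0 < 0 then b0 + size else b0
  let b := min (max b1 0) size
  (PySem.List.pyRange a b 1).map (fun i =>
    max (PySem.Int.floordiv i n) (PySem.Int.mod i n) + 1)

-- ===== PRECONDITION & SPEC =====
def Spec_solution (n : Int) (left : Int) (right : Int) (out : List Int) : Prop := out = solution_alt n left right
instance (n : Int) (left : Int) (right : Int) (out : List Int) : Decidable (Spec_solution n left right out) := by unfold Spec_solution; infer_instance

-- ===== CLAIM (what is proved, stated in full; the proofs are below) =====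
def Claim_equal_solution : Prop := ∀ (n : Int) (left : Int) (right : Int), Dom_solution n left right → Spec_solution n left right (solution n left right)

-- ===== LEMMAS AND PROOFS =====

-- abstract n×n matrix given by an entry function
def pvMat (n : Int) (g : Int → Int → Int) : List (List Int) :=
  (PySem.List.pyRange 0 n 1).map (fun r => (PySem.List.pyRange 0 n 1).map (g r))

-- entry after the first i outer iterations: max r c + 1 where max r c < i, else 0
def pvG (i r c : Int) : Int := if max r c < i then max r c + 1 else 0
-- mid-up-walk state: additionally column i is filled on rows k..i
def pvGU (i k r c : Int) : Int :=
  if max r c < i ∨ (c = i ∧ k ≤ r ∧ r ≤ i) then max r c + 1 else 0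
-- mid-left-walk state: column i filled on rows ≤ i, row i filled on columns k..i
def pvGL (i k r c : Int) : Int :=
  if max r c < i ∨ (c = i ∧ r ≤ i) ∨ (r = i ∧ k ≤ c ∧ c ≤ i) then max r c + 1 else 0

theorem pvMat_congr (n : Int) (g1 g2 : Int → Int → Int)
    (h : ∀ r c, 0 ≤ r → r < n → 0 ≤ c → c < n → g1 r c = g2 r c) :
    pvMat n g1 = pvMat n g2 := by
  unfold pvMat
  apply List.map_congr_left
  intro r hr
  rw [PySem.List.mem_pyRange_one] at hr
  apply List.map_congr_left
  intro c hc
  rw [PySem.List.mem_pyRange_one] at hc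
  exact h r c hr.1 hr.2 hc.1 hc.2

theorem pvSet_map_pyRange {α : Type} (n : Int) (F : Int → α) (j : Int) (v : α)
    (hj0 : 0 ≤ j) :
    ((PySem.List.pyRange 0 n 1).map F).set j.toNat v
      = (PySem.List.pyRange 0 n 1).map (fun r => if r = j then v else F r) := by
  apply List.ext_getElem
  · simp
  · intro k h1 h2
    simp only [List.getElem_set, List.getElem_map, PySem.List.getElem_pyRange_one]
    by_cases hkj : j.toNat = k
    · simp [hkj, show (0:Int) + k = j by omega]
    · have hkj' : ¬((k:Int) = j) := by omega
      simp [hkj, hkj']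

theorem pvGetCell_mat (n : Int) (g : Int → Int → Int) (r c : Int)
    (hr0 : 0 ≤ r) (hrn : r < n) (hc0 : 0 ≤ c) (hcn : c < n) :
    pvGetCell (pvMat n g) r c = g r c := by
  unfold pvGetCell pvMat
  rw [PySem.List.pyGetD_map_pyRange_of_nonneg _ n r _ hr0 hrn,
      PySem.List.pyGetD_map_pyRange_of_nonneg _ n c _ hc0 hcn]

theorem pvSetCell_mat (n : Int) (g : Int → Int → Int) (r c v : Int)
    (hr0 : 0 ≤ r) (hrn : r < n) (hc0 : 0 ≤ c) :
    pvSetCell (pvMat n g) r c v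
      = pvMat n (fun r' c' => if r' = r ∧ c' = c then v else g r' c') := by
  unfold pvSetCell pvMat
  rw [PySem.List.pyGetD_map_pyRange_of_nonneg _ n r _ hr0 hrn,
      PySem.List.pySetD_of_nonneg _ _ hc0,
      pvSet_map_pyRange n _ c v hc0,
      PySem.List.pySetD_of_nonneg _ _ hr0,
      pvSet_map_pyRange n _ r _ hr0]
  apply List.map_congr_left
  intro r' _
  by_cases h : r' = r
  · subst h
    rw [if_pos rfl]
    apply List.map_congr_left
    intro c' _
    by_cases h2 : c' = c <;> simp [h2]
  · simp only [if_neg h]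
    apply List.map_congr_left
    intro c' _
    simp [h]

theorem pvUpLoop (n i : Int) (hi0 : 0 ≤ i) (hin : i < n) :
    ∀ (fuel : Nat) (r : Int), 0 ≤ r → r ≤ i → r < fuel →
    pvWhile n (-1) 0 (i+1) fuel (pvMat n (pvGU i r)) r i = pvMat n (pvGU i 0) := by
  intro fuel
  induction fuel with
  | zero => intro r h0 _ hf; omega
  | succ fuel ih =>
    intro r h0 hri _
    rw [pvWhile]
    by_cases hr : r = 0
    · subst hr
      rw [if_neg (by simp)]
    · have hcell : pvGetCell (pvMat n (pvGU i r)) (r + -1) (i + 0) = 0 := by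
        rw [pvGetCell_mat n _ _ _ (by omega) (by omega) (by omega) (by omega)]
        unfold pvGU
        rw [if_neg (by omega)]
      rw [if_pos ⟨by omega, by omega, by omega, by omega, hcell⟩]
      rw [pvSetCell_mat n _ _ _ _ (by omega) (by omega) (by omega)]
      have hstate : pvMat n (fun r' c' => if r' = r + -1 ∧ c' = i + 0 then i+1
          else pvGU i r r' c') = pvMat n (pvGU i (r-1)) := by
        apply pvMat_congr
        intro r' c' _ _ _ _
        unfold pvGU
        split_ifs <;> omega
      rw [hstate]
      have := ih (r-1) (by omega) (by omega) (by omega)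
      simpa using this

theorem pvLeftLoop (n i : Int) (hi0 : 0 ≤ i) (hin : i < n) :
    ∀ (fuel : Nat) (c : Int), 0 ≤ c → c ≤ i → c < fuel →
    pvWhile n 0 (-1) (i+1) fuel (pvMat n (pvGL i c)) i c = pvMat n (pvGL i 0) := by
  intro fuel
  induction fuel with
  | zero => intro c h0 _ hf; omega
  | succ fuel ih =>
    intro c h0 hci _
    rw [pvWhile]
    by_cases hc : c = 0
    · subst hc
      rw [if_neg (by simp)]
    · have hcell : pvGetCell (pvMat n (pvGL i c)) (i + 0) (c + -1) = 0 := by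
        rw [pvGetCell_mat n _ _ _ (by omega) (by omega) (by omega) (by omega)]
        unfold pvGL
        rw [if_neg (by omega)]
      rw [if_pos ⟨by omega, by omega, by omega, by omega, hcell⟩]
      rw [pvSetCell_mat n _ _ _ _ (by omega) (by omega) (by omega)]
      have hstate : pvMat n (fun r' c' => if r' = i + 0 ∧ c' = c + -1 then i+1
          else pvGL i c r' c') = pvMat n (pvGL i (c-1)) := by
        apply pvMat_congr
        intro r' c' _ _ _ _
        unfold pvGL
        split_ifs <;> omega
      rw [hstate]
      have := ih (c-1) (by omega) (by omega) (by omega)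
      simpa using this

theorem pvOuter_step (n i : Int) (hi0 : 0 ≤ i) (hin : i < n) :
    pvOuter n (pvMat n (pvG i)) i = pvMat n (pvG (i+1)) := by
  unfold pvOuter
  dsimp only
  rw [pvSetCell_mat n _ _ _ _ hi0 hin hi0]
  have h1 : pvMat n (fun r' c' => if r' = i ∧ c' = i then i+1 else pvG i r' c')
      = pvMat n (pvGU i i) := by
    apply pvMat_congr; intro r c _ _ _ _; unfold pvG pvGU; split_ifs <;> omega
  rw [h1, pvUpLoop n i hi0 hin (n.toNat+1) i hi0 le_rfl (by omega)]
  have h2 : pvMat n (pvGU i 0) = pvMat n (pvGL i i) := by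
    apply pvMat_congr; intro r c _ _ _ _; unfold pvGU pvGL; split_ifs <;> omega
  rw [h2, pvLeftLoop n i hi0 hin (n.toNat+1) i hi0 le_rfl (by omega)]
  apply pvMat_congr; intro r c _ _ _ _; unfold pvGL pvG; split_ifs <;> omega

theorem pvFold (n : Int) :
    ∀ (m : Int), 0 ≤ m → m ≤ n →
    (PySem.List.pyRange m n 1).foldl (pvOuter n) (pvMat n (pvG m)) = pvMat n (pvG n) := by
  intro m h0 hn
  obtain ⟨d, hd⟩ : ∃ d : Nat, n - m = d := ⟨(n-m).toNat, by omega⟩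
  induction d generalizing m with
  | zero =>
    have : m = n := by omega
    subst this
    rw [PySem.List.pyRange_one_eq_nil le_rfl]
    rfl
  | succ d ih =>
    rw [PySem.List.pyRange_one_cons (by omega)]
    simp only [List.foldl_cons]
    rw [pvOuter_step n m h0 (by omega)]
    exact ih (m+1) (by omega) (by omega) (by omega)

theorem pvFlat (n : Int) (hn : 0 < n) :
    ∀ (m : Nat),
    ((PySem.List.pyRange 0 (m:Int) 1).flatMap
        (fun r => (PySem.List.pyRange 0 n 1).map (fun c => max r c + 1)))
      = (PySem.List.pyRange 0 ((m:Int)*n) 1).map (fun k =>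
          max (PySem.Int.floordiv k n) (PySem.Int.mod k n) + 1) := by
  intro m
  induction m with
  | zero => simp [PySem.List.pyRange_one_eq_nil]
  | succ m ih =>
    push_cast
    rw [PySem.List.pyRange_one_succ_right (by positivity : (0:Int) ≤ (m:Int)),
        List.flatMap_append,
        show ((m:Int)+1)*n = (m:Int)*n + n by ring,
        PySem.List.pyRange_one_append 0 ((m:Int)*n) ((m:Int)*n + n) (by positivity) (by omega),
        List.map_append, ih]
    congr 1
    simp only [List.flatMap_cons, List.flatMap_nil, List.append_nil]
    rw [PySem.List.pyRange_one ((m:Int)*n) ((m:Int)*n + n),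
        PySem.List.pyRange_one 0 n]
    simp only [List.map_map, add_sub_cancel_left, sub_zero]
    apply List.map_congr_left
    intro k hk
    rw [List.mem_range] at hk
    have hkn : (k:Int) < n := by omega
    have hdiv : PySem.Int.floordiv ((m:Int)*n + k) n = m := by
      rw [PySem.Int.floordiv_eq_iff_of_pos hn]
      constructor
      · omega
      · nlinarith
    have hmod : PySem.Int.mod ((m:Int)*n + k) n = k := by
      have := PySem.Int.floordiv_mul_add_mod ((m:Int)*n + k) n
      rw [hdiv] at this
      omega
    simp only [Function.comp_apply, hdiv, hmod]
    omega

theorem pvSlice_map_pyRange (F : Int → Int) (L : Nat) (a b : Int) :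
    PySem.List.slice ((PySem.List.pyRange 0 (L:Int) 1).map F) (some a) (some b)
      = (PySem.List.pyRange ((PySem.List.clampIdx L a : Nat) : Int)
          ((PySem.List.clampIdx L b : Nat) : Int) 1).map F := by
  have hlen : ((PySem.List.pyRange 0 (L:Int) 1).map F).length = L := by
    simp [PySem.List.length_pyRange_one]
  set A := PySem.List.clampIdx L a with hA
  set B := PySem.List.clampIdx L b with hB
  have hAL : A ≤ L := PySem.List.clampIdx_le L a
  have hBL : B ≤ L := PySem.List.clampIdx_le L b
  unfold PySem.List.slice
  dsimp only
  rw [hlen, ← hA, ← hB]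
  have hdrop : List.drop A ((PySem.List.pyRange 0 (L:Int) 1).map F)
      = (PySem.List.pyRange (A:Int) (L:Int) 1).map F := by
    rw [PySem.List.pyRange_one_append 0 (A:Int) (L:Int) (by positivity) (by exact_mod_cast hAL),
        List.map_append]
    apply List.drop_left'
    simp [PySem.List.length_pyRange_one]
  rw [hdrop]
  by_cases hAB : B ≤ A
  · rw [show B - A = 0 by omega, List.take_zero,
        PySem.List.pyRange_one_eq_nil (by exact_mod_cast hAB)]
    simp
  · rw [PySem.List.pyRange_one_append (A:Int) (B:Int) (L:Int)
          (by exact_mod_cast le_of_not_ge hAB) (by exact_mod_cast hBL),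
        List.map_append]
    apply List.take_left'
    simp [PySem.List.length_pyRange_one]

theorem pvMain (n left right : Int) : solution n left right = solution_alt n left right := by
  unfold solution solution_alt
  dsimp only
  by_cases hn : 0 < n
  · have harr0 : (PySem.List.pyRange 0 n 1).map (fun _ => List.replicate n.toNat (0:Int))
        = pvMat n (pvG 0) := by
      unfold pvMat
      apply List.map_congr_left
      intro r hr
      rw [PySem.List.mem_pyRange_one] at hr
      rw [show (PySem.List.pyRange 0 n 1).map (pvG 0 r)
            = (PySem.List.pyRange 0 n 1).map (fun _ => (0:Int)) from
          List.map_congr_left (by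
            intro c hc
            rw [PySem.List.mem_pyRange_one] at hc
            unfold pvG
            rw [if_neg (by omega)])]
      rw [List.map_const']
      simp [PySem.List.length_pyRange_one]
    rw [harr0, pvFold n 0 le_rfl (by omega)]
    have hmat : pvMat n (pvG n) = pvMat n (fun r c => max r c + 1) := by
      apply pvMat_congr
      intro r c _ _ _ _
      unfold pvG
      rw [if_pos (by omega)]
    rw [hmat]
    unfold pvMat
    rw [List.flatMap_map]
    have hflat := pvFlat n hn n.toNat
    rw [Int.toNat_of_nonneg (by omega)] at hflat
    rw [hflat]
    rw [show n * n = (((n*n).toNat : Nat) : Int) by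
      rw [Int.toNat_of_nonneg (by positivity)]]
    rw [pvSlice_map_pyRange]
    rw [if_pos hn]
    congr 1
    congr 1
    · unfold PySem.List.clampIdx
      split_ifs <;> omega
    · unfold PySem.List.clampIdx
      split_ifs <;> omega
  · rw [PySem.List.pyRange_one_eq_nil (by omega)]
    simp only [List.map_nil, List.foldl_nil, List.flatMap_nil]
    rw [if_neg hn]
    rw [show min (max (if left < 0 then left + 0 else left) 0) 0 = 0 by split_ifs <;> omega,
        show min (max (if right + 1 < 0 then right + 1 + 0 else right + 1) 0) 0 = 0 by
          split_ifs <;> omega,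
        PySem.List.pyRange_one_eq_nil le_rfl]
    unfold PySem.List.slice
    simp

-- ===== VERDICT (by name: the statement is the Claim_ definition above) =====
theorem solution_spec : Claim_equal_solution := by
  intro n left right _
  exact pvMain n left right
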